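-- pv_equiv track=rewrite | github.com/Mome/falten | barbra.py | _get_pack_sizes
-- ===== SOURCE A (Python) =====
-- def _get_pack_sizes(rmbi):
--     lmps = 0
--     pack_sizes = []
--     for ri in rmbi:
--
--         if lmps == 0:
--             lmps = ri
--
--         pack_sizes.append(lmps + 1)
--
--         if ri == -lmps:
--             lmps = 0
--
--     return tuple(pack_sizes)
-- ===== SOURCE B (Python) =====
-- def _get_pack_sizes(rmbi):
--     # Segment the list into packs: each pack starts at value v and runs up to
--     # and including the first element equal to -v (or the end of the list);
--     # every element of the pack contributes v + 1.
--     items = list(rmbi)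
--     out = []
--     while items:
--         v = items[0]
--         try:
--             plen = items.index(-v) + 1
--         except ValueError:
--             plen = len(items)
--         out.extend([v + 1] * plen)
--         items = items[plen:]
--     return tuple(out)
-- ===== Notes on version B (the rewrite author's own statement) =====
-- stated objective: alternative
-- what changed: Replaces A's element-by-element loop carrying a pack-state flag (lmps) by index-based pack segmentation: find the pack terminator with list.index, emit the whole pack of identical values at once, and recurse on the remainder.
import Mathlib
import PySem

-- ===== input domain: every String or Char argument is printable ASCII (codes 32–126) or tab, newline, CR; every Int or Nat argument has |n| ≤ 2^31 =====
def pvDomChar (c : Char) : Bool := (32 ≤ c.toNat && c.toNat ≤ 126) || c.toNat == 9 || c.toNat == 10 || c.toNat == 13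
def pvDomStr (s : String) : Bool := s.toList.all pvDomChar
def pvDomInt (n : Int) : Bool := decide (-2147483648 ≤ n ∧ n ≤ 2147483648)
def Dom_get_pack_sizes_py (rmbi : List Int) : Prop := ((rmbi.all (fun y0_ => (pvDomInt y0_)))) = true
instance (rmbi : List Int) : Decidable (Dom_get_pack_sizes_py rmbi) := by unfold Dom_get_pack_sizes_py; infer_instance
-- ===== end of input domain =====

-- B replaces A's carried state flag by index-based pack segmentation (find the pack
-- terminator, emit the whole pack at once, recurse on the rest); objective: alternative.

-- ===== PORT A =====
-- A's loop body, on state (lmps, pack_sizes)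
def pvAStep (s : Int × List Int) (ri : Int) : Int × List Int :=
  let lmps := if s.1 = 0 then ri else s.1
  let ps := s.2 ++ [lmps + 1]
  (if ri = -lmps then 0 else lmps, ps)

def get_pack_sizes_py (rmbi : List Int) : List Int :=
  (rmbi.foldl pvAStep (0, [])).2

-- ===== PORT B =====
-- length of the pack opened by value v at the head of xs: up to and including the
-- first element equal to -v (Python: items.index(-v) + 1), else the whole list
def pvPackLen (v : Int) (xs : List Int) : Nat :=
  match PySem.List.index? xs (-v) with
  | some j => j + 1
  | none => xs.length

theorem pvPackLen_pos (v x : Int) (t : List Int) : 1 ≤ pvPackLen v (x :: t) := by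
  unfold pvPackLen
  cases h : PySem.List.index? (x :: t) (-v) <;> simp

def get_pack_sizes_py_alt : List Int → List Int
  | [] => []
  | x :: t =>
    let plen := pvPackLen x (x :: t)
    List.replicate plen (x + 1) ++ get_pack_sizes_py_alt ((x :: t).drop plen)
termination_by xs => xs.length
decreasing_by
  simp only [List.length_drop, List.length_cons]
  have := pvPackLen_pos x x t
  omega

-- ===== PRECONDITION & SPEC =====
def Spec_get_pack_sizes_py (rmbi : List Int) (out : List Int) : Prop := out = get_pack_sizes_py_alt rmbi
instance (rmbi : List Int) (out : List Int) : Decidable (Spec_get_pack_sizes_py rmbi out) := by unfold Spec_get_pack_sizes_py; infer_instance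

-- ===== CLAIM (what is proved, stated in full; the proofs are below) =====
def Claim_equal_get_pack_sizes_py : Prop := ∀ (rmbi : List Int), Dom_get_pack_sizes_py rmbi → Spec_get_pack_sizes_py rmbi (get_pack_sizes_py rmbi)

-- ===== LEMMAS AND PROOFS =====

theorem pvAStep_zero (acc : List Int) (x : Int) :
    pvAStep (0, acc) x = (if x = -x then 0 else x, acc ++ [x + 1]) := by
  simp [pvAStep]

theorem pvAStep_ne {v : Int} (hv : v ≠ 0) (acc : List Int) (x : Int) :
    pvAStep (v, acc) x = (if x = -v then 0 else v, acc ++ [v + 1]) := by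
  simp [pvAStep, hv]

-- accumulator of A's fold factors out
theorem pvA_acc (xs : List Int) : ∀ (lmps : Int) (acc : List Int),
    (List.foldl pvAStep (lmps, acc) xs).2 = acc ++ (List.foldl pvAStep (lmps, []) xs).2 := by
  induction xs with
  | nil => intro lmps acc; simp
  | cons x t ih =>
    intro lmps acc
    simp only [List.foldl_cons, pvAStep]
    rw [ih]
    conv_rhs => rw [ih]
    simp

theorem pvPackLen_cons_of_ne {v y : Int} (t : List Int) (h : y ≠ -v) :
    pvPackLen v (y :: t) = pvPackLen v t + 1 := by
  unfold pvPackLen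
  rw [PySem.List.index?_cons_of_ne t h]
  cases h' : PySem.List.index? t (-v) <;> simp

-- inside a pack opened with nonzero value v, A's fold emits v+1 for each element up to
-- and including the first -v, then continues in the reset state on the rest
theorem pvA_inner (v : Int) (hv : v ≠ 0) : ∀ (ys : List Int) (acc : List Int),
    (List.foldl pvAStep (v, acc) ys).2 =
      acc ++ List.replicate (pvPackLen v ys) (v + 1) ++
        (List.foldl pvAStep (0, []) (ys.drop (pvPackLen v ys))).2 := by
  intro ys
  induction ys with
  | nil => intro acc; simp [pvPackLen, PySem.List.index?]
  | cons y t ih =>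
    intro acc
    simp only [List.foldl_cons, pvAStep_ne hv]
    by_cases hy : y = -v
    · rw [if_pos hy]
      have hlen : pvPackLen v (y :: t) = 1 := by
        unfold pvPackLen
        rw [hy, PySem.List.index?_cons_self]
      rw [pvA_acc, hlen]
      simp
    · rw [if_neg hy, ih]
      rw [pvPackLen_cons_of_ne t hy]
      simp [List.replicate_succ]

theorem pvA_main : ∀ (n : Nat) (xs : List Int), xs.length ≤ n →
    (List.foldl pvAStep (0, []) xs).2 = get_pack_sizes_py_alt xs := by
  intro n
  induction n with
  | zero =>
    intro xs hxs
    have : xs = [] := List.length_eq_zero_iff.mp (Nat.le_zero.mp hxs)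
    subst this
    simp [get_pack_sizes_py_alt]
  | succ n ih =>
    intro xs hxs
    cases xs with
    | nil => simp [get_pack_sizes_py_alt]
    | cons x t =>
      simp only [List.foldl_cons, pvAStep_zero]
      have ht : t.length ≤ n := by simpa using hxs
      by_cases hx : x = 0
      · subst hx
        simp only [neg_zero, ite_self]
        rw [pvA_acc, ih t ht]
        have hlen : pvPackLen 0 ((0 : Int) :: t) = 1 := by
          unfold pvPackLen
          rw [show -(0 : Int) = 0 by ring, PySem.List.index?_cons_self]
        rw [get_pack_sizes_py_alt]
        simp [hlen]
      · have hxneg : ¬ (x = -x) := by omega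
        simp only [if_neg hxneg]
        rw [pvA_inner x hx t ([] ++ [x + 1])]
        rw [ih (t.drop (pvPackLen x t)) (le_trans (by simp) ht)]
        rw [get_pack_sizes_py_alt]
        have hne : x ≠ -x := hxneg
        rw [pvPackLen_cons_of_ne t hne]
        simp [List.replicate_succ]

-- ===== VERDICT (by name: the statement is the Claim_ definition above) =====
theorem get_pack_sizes_py_spec : Claim_equal_get_pack_sizes_py := by
  intro rmbi _
  unfold Spec_get_pack_sizes_py get_pack_sizes_py
  exact pvA_main rmbi.length rmbi le_rfl
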